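-- pv_equiv track=rewrite | github.com/EverettNC/ALPHAWOLF-main | christman_ai/alphawolf/infrastructure/simplified_conversation.py | _is_knowledge_query
-- ===== SOURCE A (Python) =====
-- def _is_knowledge_query(text: str) -> bool:
--     """
--     Determine if the input is a knowledge query
--
--     Args:
--         text: The input text to analyze
--
--     Returns:
--         True if it's a knowledge query, False otherwise
--     """
--     # For simplicity, we'll check for question-related patterns
--     text_lower = text.lower()
--
--     # Check for question words
--     question_indicators = [
--         "what", "how", "why", "when", "where", "who", "tell me about",
--         "explain", "describe", "information on", "facts about"
--     ]
--
--     # Check for knowledge-related topics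
--     knowledge_topics = [
--         "communication", "nonverbal", "eye contact", "body language",
--         "facial expression", "gesture", "autism", "assistive", "therapy",
--         "augmentative", "alternative", "speech", "learn", "know", "educate"
--     ]
--
--     # Check if it's a question about AlphaVox's knowledge
--     alphavox_knowledge_indicators = [
--         "what do you know", "tell me what you know", "what have you learned",
--         "how much do you know", "what are you learning about", "your knowledge",
--         "have you learned", "what topics", "educate yourself", "teach yourself"
--     ]
--
--     # Check for direct indicators
--     for indicator in alphavox_knowledge_indicators:
--         if indicator in text_lower:
--             return True
--
--     # Check for question pattern + knowledge topic
--     for q_indicator in question_indicators: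
--         if q_indicator in text_lower:
--             for topic in knowledge_topics:
--                 if topic in text_lower:
--                     return True
--
--     # If it ends with a question mark and contains a knowledge topic
--     if text.endswith("?"):
--         for topic in knowledge_topics:
--             if topic in text_lower:
--                 return True
--
--     return False
-- ===== SOURCE B (Python) =====
-- _QUESTION_INDICATORS = [
--     "what", "how", "why", "when", "where", "who", "tell me about",
--     "explain", "describe", "information on", "facts about"
-- ]
-- _KNOWLEDGE_TOPICS = [
--     "communication", "nonverbal", "eye contact", "body language",
--     "facial expression", "gesture", "autism", "assistive", "therapy",
--     "augmentative", "alternative", "speech", "learn", "know", "educate"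
-- ]
-- _ALPHAVOX_INDICATORS = [
--     "what do you know", "tell me what you know", "what have you learned",
--     "how much do you know", "what are you learning about", "your knowledge",
--     "have you learned", "what topics", "educate yourself", "teach yourself"
-- ]
-- # one flat pattern table: (pattern, category) with 0=alphavox, 1=question, 2=topic
-- _PATTERNS = (
--     [(p, 0) for p in _ALPHAVOX_INDICATORS]
--     + [(p, 1) for p in _QUESTION_INDICATORS]
--     + [(p, 2) for p in _KNOWLEDGE_TOPICS]
-- )
--
--
-- def _is_knowledge_query(text: str) -> bool:
--     """Single left-to-right scan of the lowered text: at each position mark the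
--     category of every pattern that starts there, then decide from the flags."""
--     tl = text.lower()
--     found = [False, False, False]
--     for i in range(len(tl)):
--         for pat, cat in _PATTERNS:
--             if tl.startswith(pat, i):
--                 found[cat] = True
--     return found[0] or ((found[1] or text.endswith("?")) and found[2])
-- ===== Notes on version B (the rewrite author's own statement) =====
-- stated objective: alternative
-- what changed: Replaces A's three per-keyword-list substring scans with early returns (and a topic list re-scanned inside the question loop and again in the endswith branch) by a single left-to-right pass over the positions of the lowered text against one flat (pattern, category) table, accumulating three category flags that feed one final boolean expression.
import Mathlib
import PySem

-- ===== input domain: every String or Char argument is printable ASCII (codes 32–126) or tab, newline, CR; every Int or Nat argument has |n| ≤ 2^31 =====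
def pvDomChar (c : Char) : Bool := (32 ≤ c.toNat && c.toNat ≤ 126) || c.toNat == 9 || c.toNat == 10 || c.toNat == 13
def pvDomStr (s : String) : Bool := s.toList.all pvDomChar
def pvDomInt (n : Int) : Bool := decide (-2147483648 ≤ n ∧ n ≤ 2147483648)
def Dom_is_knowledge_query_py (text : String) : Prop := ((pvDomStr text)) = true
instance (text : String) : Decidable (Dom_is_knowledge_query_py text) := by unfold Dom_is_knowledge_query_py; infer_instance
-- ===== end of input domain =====

-- B replaces A's per-keyword-list substring scans (topics re-scanned twice) by a single
-- left-to-right position scan of the lowered text against one flat (pattern, category)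
-- table accumulating three category flags; return value only, no observable mutation.

-- ===== PORT A =====
def pvQuestionIndicators : List String :=
  ["what", "how", "why", "when", "where", "who", "tell me about",
   "explain", "describe", "information on", "facts about"]

def pvKnowledgeTopics : List String :=
  ["communication", "nonverbal", "eye contact", "body language",
   "facial expression", "gesture", "autism", "assistive", "therapy",
   "augmentative", "alternative", "speech", "learn", "know", "educate"]

def pvAlphavoxIndicators : List String :=
  ["what do you know", "tell me what you know", "what have you learned",
   "how much do you know", "what are you learning about", "your knowledge",
   "have you learned", "what topics", "educate yourself", "teach yourself"]

def is_knowledge_query_py (text : String) : Bool :=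
  let text_lower := PySem.Str.lower text
  -- for indicator in alphavox_knowledge_indicators: if indicator in text_lower: return True
  if pvAlphavoxIndicators.any (fun ind => PySem.Str.isIn ind text_lower) then true
  -- for q_indicator ...: if q_indicator in text_lower: for topic ...: if topic in text_lower: return True
  else if pvQuestionIndicators.any (fun q =>
           PySem.Str.isIn q text_lower &&
           pvKnowledgeTopics.any (fun t => PySem.Str.isIn t text_lower)) then true
  -- if text.endswith("?"): for topic ...: if topic in text_lower: return True
  else if PySem.Str.endswith text "?" &&
          pvKnowledgeTopics.any (fun t => PySem.Str.isIn t text_lower) then true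
  else false

-- ===== PORT B =====
-- the flat pattern table of Source B: (pattern, category), 0 = alphavox, 1 = question, 2 = topic
def pvPatterns : List (String × Nat) :=
  pvAlphavoxIndicators.map (fun p => (p, 0)) ++
  pvQuestionIndicators.map (fun p => (p, 1)) ++
  pvKnowledgeTopics.map (fun p => (p, 2))

-- the body of Source B's inner loop: 'if tl.startswith(pat, i): found[cat] = True'
-- (tl.startswith(pat, i) with 0 ≤ i ≤ len(tl) is exactly: pat is a prefix of tl's suffix at i,
--  checked on the char list)
def pvMark (tlc : List Char) (i : Nat) (st : Bool × Bool × Bool) (pc : String × Nat) :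
    Bool × Bool × Bool :=
  if PySem.Chars.startswith (tlc.drop i) pc.1.toList then
    match pc.2 with
    | 0 => (true, st.2.1, st.2.2)
    | 1 => (st.1, true, st.2.2)
    | _ => (st.1, st.2.1, true)
  else st

def is_knowledge_query_py_alt (text : String) : Bool :=
  let tl := PySem.Str.lower text
  let tlc := tl.toList
  -- for i in range(len(tl)): for pat, cat in _PATTERNS: if tl.startswith(pat, i): found[cat] = True
  let found := (List.range tlc.length).foldl
    (fun st i => pvPatterns.foldl (pvMark tlc i) st) (false, false, false)
  found.1 || ((found.2.1 || PySem.Str.endswith text "?") && found.2.2)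

-- ===== PRECONDITION & SPEC =====
def Spec_is_knowledge_query_py (text : String) (out : Bool) : Prop := out = is_knowledge_query_py_alt text
instance (text : String) (out : Bool) : Decidable (Spec_is_knowledge_query_py text out) := by unfold Spec_is_knowledge_query_py; infer_instance

-- ===== CLAIM (what is proved, stated in full; the proofs are below) =====
def Claim_equal_is_knowledge_query_py : Prop := ∀ (text : String), Dom_is_knowledge_query_py text → Spec_is_knowledge_query_py text (is_knowledge_query_py text)

-- ===== LEMMAS AND PROOFS =====

-- an inner pass over the pattern table just ORs three per-category 'some pattern starts at i' bits
theorem pv_inner_eq (tlc : List Char) (i : Nat) (ps : List (String × Nat)) :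
    ∀ st : Bool × Bool × Bool, ps.foldl (pvMark tlc i) st =
      (st.1   || ps.any (fun pc => (pc.2 == 0) && PySem.Chars.startswith (tlc.drop i) pc.1.toList),
       st.2.1 || ps.any (fun pc => (pc.2 == 1) && PySem.Chars.startswith (tlc.drop i) pc.1.toList),
       st.2.2 || ps.any (fun pc => (!(pc.2 == 0) && !(pc.2 == 1)) && PySem.Chars.startswith (tlc.drop i) pc.1.toList)) := by
  induction ps with
  | nil => intro st; simp
  | cons pc rest ih =>
    intro st
    obtain ⟨p, c⟩ := pc
    simp only [List.foldl_cons, List.any_cons, pvMark]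
    cases h : PySem.Chars.startswith (tlc.drop i) p.toList with
    | false => simp [ih]
    | true =>
      match c with
      | 0 => rw [ih]; simp
      | 1 => rw [ih]; simp
      | Nat.succ (Nat.succ c) => rw [ih]; simp

-- the outer position loop of three OR-accumulated bits is three `any`s over the positions
theorem pv_outer_eq (l : List Nat) (a b c : Nat → Bool) :
    ∀ st : Bool × Bool × Bool,
      l.foldl (fun st i => (st.1 || a i, st.2.1 || b i, st.2.2 || c i)) st =
      (st.1 || l.any a, st.2.1 || l.any b, st.2.2 || l.any c) := by
  induction l with
  | nil => intro st; simp
  | cons x xs ih => intro st; simp [ih, Bool.or_assoc]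

theorem pv_any_swap {α β : Type} (l : List α) (m : List β) (f : α → β → Bool) :
    (l.any fun i => m.any fun x => f i x) = (m.any fun x => l.any fun i => f i x) := by
  rw [Bool.eq_iff_iff]
  simp only [List.any_eq_true]
  tauto

theorem pv_any_congr {α : Type} (l : List α) (p q : α → Bool)
    (h : ∀ x ∈ l, p x = q x) : l.any p = l.any q := by
  induction l with
  | nil => rfl
  | cons x xs ih =>
    simp only [List.any_cons, h x (by simp), ih (fun y hy => h y (by simp [hy]))]

-- 'some position of s where sub starts' = 'sub in s', for nonempty sub
theorem pv_rangeAny_isIn (s sub : List Char) (hsub : sub ≠ []) :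
    ((List.range s.length).any fun i => PySem.Chars.startswith (s.drop i) sub) =
      PySem.Chars.isIn sub s := by
  rw [Bool.eq_iff_iff]
  simp only [List.any_eq_true, List.mem_range]
  constructor
  · rintro ⟨i, -, hi⟩
    exact (PySem.Chars.exists_prefix_drop_iff_isIn sub s).mp
      ⟨i, (PySem.Chars.startswith_iff _ _).mp hi⟩
  · intro h
    obtain ⟨j, hj⟩ := (PySem.Chars.exists_prefix_drop_iff_isIn sub s).mpr h
    have hjlt : j < s.length := by
      by_contra hge
      rw [List.drop_eq_nil_of_le (Nat.le_of_not_lt hge)] at hj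
      exact hsub (List.prefix_nil.mp hj)
    exact ⟨j, hjlt, (PySem.Chars.startswith_iff _ _).mpr hj⟩

theorem pv_const_and_any {α : Type} (l : List α) (p : α → Bool) (c : Bool) :
    (l.any fun x => c && p x) = (c && l.any p) := by
  cases c <;> simp

-- hoisting a constant conjunct out of A's nested topic loop
theorem pv_any_and_const {α : Type} (xs : List α) (p : α → Bool) (c : Bool) :
    (xs.any fun x => p x && c) = (xs.any p && c) := by
  cases c <;> simp

theorem pv_alpha_ne : ∀ w ∈ pvAlphavoxIndicators, w.toList ≠ [] := by decide
theorem pv_question_ne : ∀ w ∈ pvQuestionIndicators, w.toList ≠ [] := by decide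
theorem pv_topic_ne : ∀ w ∈ pvKnowledgeTopics, w.toList ≠ [] := by decide

-- each category column of the scan collapses to the A-side `any isIn` over its keyword list
theorem pv_col0 (tlc : List Char) :
    ((List.range tlc.length).any fun i => pvPatterns.any fun pc =>
        (pc.2 == 0) && PySem.Chars.startswith (tlc.drop i) pc.1.toList) =
      pvAlphavoxIndicators.any fun w => PySem.Chars.isIn w.toList tlc := by
  rw [pv_any_swap]
  simp only [pvPatterns, List.any_append, List.any_map, Function.comp_def, pv_const_and_any]
  simp
  exact pv_any_congr _ _ _ (fun w hw => pv_rangeAny_isIn tlc w.toList (pv_alpha_ne w hw))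

theorem pv_col1 (tlc : List Char) :
    ((List.range tlc.length).any fun i => pvPatterns.any fun pc =>
        (pc.2 == 1) && PySem.Chars.startswith (tlc.drop i) pc.1.toList) =
      pvQuestionIndicators.any fun w => PySem.Chars.isIn w.toList tlc := by
  rw [pv_any_swap]
  simp only [pvPatterns, List.any_append, List.any_map, Function.comp_def, pv_const_and_any]
  simp
  exact pv_any_congr _ _ _ (fun w hw => pv_rangeAny_isIn tlc w.toList (pv_question_ne w hw))

theorem pv_col2 (tlc : List Char) :
    ((List.range tlc.length).any fun i => pvPatterns.any fun pc =>
        (!(pc.2 == 0) && !(pc.2 == 1)) && PySem.Chars.startswith (tlc.drop i) pc.1.toList) =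
      pvKnowledgeTopics.any fun w => PySem.Chars.isIn w.toList tlc := by
  rw [pv_any_swap]
  simp only [pvPatterns, List.any_append, List.any_map, Function.comp_def, pv_const_and_any]
  simp
  exact pv_any_congr _ _ _ (fun w hw => pv_rangeAny_isIn tlc w.toList (pv_topic_ne w hw))

-- A's early-return if-chain equals B's flat boolean expression, atom by atom
theorem pv_bool_final (a q t e : Bool) :
    (if a then true else if q && t then true else if e && t then true else false) =
      (a || ((q || e) && t)) := by
  cases a <;> cases q <;> cases t <;> cases e <;> rfl

theorem is_knowledge_query_py_spec' (text : String) :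
    is_knowledge_query_py text = is_knowledge_query_py_alt text := by
  simp only [is_knowledge_query_py, is_knowledge_query_py_alt]
  simp only [pv_inner_eq, pv_outer_eq, Bool.false_or, pv_col0, pv_col1, pv_col2,
    pv_any_and_const, PySem.Str.isIn_eq]
  exact pv_bool_final _ _ _ _

-- ===== VERDICT (by name: the statement is the Claim_ definition above) =====
theorem is_knowledge_query_py_spec : Claim_equal_is_knowledge_query_py := by
  intro text _
  unfold Spec_is_knowledge_query_py
  exact is_knowledge_query_py_spec' text
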